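-- pv_equiv track=rewrite | github.com/romperstomper/aoc2018 | aoc2/aoc2.py | count
-- ===== SOURCE A (Python) =====
-- def count(data):
--   count2=0
--   count3=0
--   for i in data:
--       seen2=False
--       seen3=False
--       for k in set(i):
--           if i.count(k) == 2 and not seen2:
--               count2 +=1
--               seen2=True
--           if i.count(k) == 3 and not seen3:
--               count3 +=1
--               seen3=True
--   return count2,count3
-- ===== SOURCE B (Python) =====
-- def count(data):
--     c2 = 0
--     c3 = 0
--     for s in data:
--         cs = sorted(s)
--         n = len(cs)
--         has2 = False
--         has3 = False
--         i = 0
--         while i < n: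
--             j = i
--             while j < n and cs[j] == cs[i]:
--                 j += 1
--             run = j - i
--             if run == 2:
--                 has2 = True
--             if run == 3:
--                 has3 = True
--             i = j
--         c2 += has2
--         c3 += has3
--     return c2, c3
-- ===== Notes on version B (the rewrite author's own statement) =====
-- stated objective: alternative
-- what changed: Replaces the per-letter loop with repeated i.count scans and flag state by sorting each string's characters and scanning the sorted list once, detecting runs of equal characters of length exactly 2 or 3 with a two-index run-length sweep.
import Mathlib
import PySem

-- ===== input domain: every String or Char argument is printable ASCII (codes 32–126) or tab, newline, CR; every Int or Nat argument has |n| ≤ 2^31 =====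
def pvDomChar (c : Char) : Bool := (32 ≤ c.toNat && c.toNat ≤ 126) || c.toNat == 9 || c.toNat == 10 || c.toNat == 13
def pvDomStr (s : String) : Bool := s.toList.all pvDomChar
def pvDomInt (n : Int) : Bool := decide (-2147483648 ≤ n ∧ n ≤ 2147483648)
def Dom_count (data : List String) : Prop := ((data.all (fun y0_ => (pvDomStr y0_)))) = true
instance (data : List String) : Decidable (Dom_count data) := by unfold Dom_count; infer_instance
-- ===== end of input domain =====

-- B sorts each string and counts run lengths in one sweep instead of re-scanning with i.count per letter.

-- ===== PORT A =====
-- inner loop body over k ∈ set(i); state = (count2, count3, seen2, seen3).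
-- i.count(k) for a single char k is exactly the number of occurrences of k, ported as List.count.
def countStepA (l : List Char) (st : Int × Int × Bool × Bool) (k : Char) : Int × Int × Bool × Bool :=
  let st := if l.count k == 2 && !st.2.2.1 then (st.1 + 1, st.2.1, true, st.2.2.2) else st
  if l.count k == 3 && !st.2.2.2 then (st.1, st.2.1 + 1, st.2.2.1, true) else st

def count (data : List String) : Int × Int :=
  data.foldl (fun (acc : Int × Int) i =>
    let l := i.toList
    let st := (PySem.Set.ofList l).foldl (countStepA l) (acc.1, acc.2, false, false)
    (st.1, st.2.1)) (0, 0)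

-- ===== PORT B =====
-- the 'while i < n' sweep over the sorted list: the inner 'while cs[j] == cs[i]' advance is the
-- takeWhile/dropWhile split at the head, run = 1 + length of the equal prefix.
def runScanB (cs : List Char) (h2 h3 : Bool) : Bool × Bool :=
  match cs with
  | [] => (h2, h3)
  | c :: rest =>
    let run := 1 + (rest.takeWhile (fun x => x == c)).length
    runScanB (rest.dropWhile (fun x => x == c))
      (h2 || decide (run = 2)) (h3 || decide (run = 3))
termination_by cs.length
decreasing_by
  simp only [List.length_cons]
  exact Nat.lt_succ_of_le (List.length_dropWhile_le _ _)

def count_alt (data : List String) : Int × Int :=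
  data.foldl (fun (acc : Int × Int) s =>
    let cs := PySem.List.sorted s.toList (fun x => x) false
    let hs := runScanB cs false false
    (acc.1 + (if hs.1 then 1 else 0), acc.2 + (if hs.2 then 1 else 0))) (0, 0)

-- ===== PRECONDITION & SPEC =====
def Spec_count (data : List String) (out : Int × Int) : Prop := out = count_alt data
instance (data : List String) (out : Int × Int) : Decidable (Spec_count data out) := by unfold Spec_count; infer_instance

-- ===== CLAIM (what is proved, stated in full; the proofs are below) =====
def Claim_equal_count : Prop := ∀ (data : List String), Dom_count data → Spec_count data (count data)

-- ===== LEMMAS AND PROOFS =====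

-- A's flagged inner loop over any iteration list d computes "does some k ∈ d have count 2 (resp. 3)".
theorem foldl_countStepA (l : List Char) (d : List Char) :
    ∀ (c2 c3 : Int) (s2 s3 : Bool),
      d.foldl (countStepA l) (c2, c3, s2, s3) =
        (c2 + (if !s2 && d.any (fun k => l.count k == 2) then 1 else 0),
         c3 + (if !s3 && d.any (fun k => l.count k == 3) then 1 else 0),
         s2 || d.any (fun k => l.count k == 2),
         s3 || d.any (fun k => l.count k == 3)) := by
  induction d with
  | nil => intro c2 c3 s2 s3; simp
  | cons k d ih =>
      intro c2 c3 s2 s3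
      simp only [List.foldl_cons, List.any_cons, countStepA]
      by_cases h2 : l.count k = 2 <;> by_cases h3 : l.count k = 3 <;>
        cases s2 <;> cases s3 <;>
        simp [h2, h3, ih]

-- in a sorted tail whose elements all are ≥ c, dropping the leading c's drops ALL the c's
theorem count_dropWhile_sorted (c : Char) (rest : List Char)
    (hs : rest.Pairwise (· ≤ ·)) (hall : ∀ x ∈ rest, c ≤ x) :
    (rest.dropWhile (fun x => x == c)).count c = 0 := by
  induction rest with
  | nil => simp
  | cons x t ih =>
      rcases List.pairwise_cons.mp hs with ⟨hxt, ht⟩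
      by_cases hx : x = c
      · subst hx
        simp only [List.dropWhile_cons, beq_self_eq_true, if_true]
        exact ih ht (fun y hy => hall y (List.mem_cons_of_mem _ hy))
      · have hxc : c < x := lt_of_le_of_ne (hall x (List.mem_cons_self)) (fun h => hx h.symm)
        simp only [List.dropWhile_cons, beq_iff_eq, hx, if_false]
        have hct : c ∉ x :: t := by
          intro hmem
          rcases List.mem_cons.mp hmem with h | h
          · exact hx h.symm
          · exact absurd (lt_of_lt_of_le hxc (hxt c h)) (lt_irrefl c)
        exact List.count_eq_zero.mpr hct

-- run-length sweep over a sorted list = "some element has count 2 / 3"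
theorem runScanB_eq_aux (n : Nat) : ∀ (cs : List Char), cs.length ≤ n → cs.Pairwise (· ≤ ·) →
    ∀ (h2 h3 : Bool),
      runScanB cs h2 h3 =
        (h2 || cs.any (fun k => cs.count k == 2),
         h3 || cs.any (fun k => cs.count k == 3)) := by
  induction n with
  | zero =>
      intro cs hlen _ h2 h3
      have : cs = [] := List.length_eq_zero_iff.mp (Nat.le_zero.mp hlen)
      subst this; simp [runScanB]
  | succ n ihn =>
      intro cs hlen hs h2 h3
      match cs with
      | [] => simp [runScanB]
      | c :: rest =>
      rcases List.pairwise_cons.mp hs with ⟨hcrest, hrest⟩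
      set run := 1 + (rest.takeWhile (fun x => x == c)).length with hrun
      have hsplit : rest = rest.takeWhile (fun x => x == c) ++ rest.dropWhile (fun x => x == c) :=
        (List.takeWhile_append_dropWhile).symm
      set tk := rest.takeWhile (fun x => x == c) with htk
      set dr := rest.dropWhile (fun x => x == c) with hdr
      have hdrs : dr.Pairwise (· ≤ ·) := hrest.sublist (List.dropWhile_sublist _)
      have hdrc : dr.count c = 0 := count_dropWhile_sorted c rest hrest hcrest
      have htkc : ∀ x ∈ tk, x = c := by
        intro x hx
        have := List.mem_takeWhile_imp (htk ▸ hx)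
        simpa using this
      -- count of c in the whole list is run
      have hcount_c : (c :: rest).count c = run := by
        rw [List.count_cons_self, hsplit, List.count_append]
        have h1 : tk.count c = tk.length := by
          rw [List.count_eq_length]
          intro x hx; exact ((htkc x hx) ▸ rfl)
        omega
      -- count of k ≠ c in whole list = count in dr
      have hcount_ne : ∀ k : Char, k ≠ c → (c :: rest).count k = dr.count k := by
        intro k hk
        rw [hsplit, List.count_cons, List.count_append]
        have h0 : tk.count k = 0 := List.count_eq_zero.mpr (fun hm => hk (htkc k hm))
        simp [h0, (Ne.symm hk : c ≠ k)]
      -- elements of dr are ≠ c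
      have hdr_ne : ∀ k ∈ dr, k ≠ c := by
        intro k hk hkc
        subst hkc
        exact absurd (List.count_pos_iff.mpr hk) (by omega)
      have hany : ∀ v : Nat,
          (c :: rest).any (fun k => (c :: rest).count k == v)
            = (decide (run = v) || dr.any (fun k => dr.count k == v)) := by
        intro v
        have hmemdr : ∀ k, k ∈ rest → k ∉ dr → (c :: rest).count k = run ∧ k = c := by
          intro k hkrest hkdr
          have : k ∈ tk := by
            rcases List.mem_append.mp (hsplit ▸ hkrest) with h | h
            · exact h
            · exact absurd h hkdr
          have hkc := htkc k this
          exact ⟨hkc ▸ hcount_c, hkc⟩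
        cases hdec : (c :: rest).any (fun k => (c :: rest).count k == v)
        · -- no element of c::rest has count v
          rw [List.any_eq_false] at hdec
          have h1 : ¬ run = v := by
            have := hdec c List.mem_cons_self
            simp only [beq_iff_eq, hcount_c] at this
            exact this
          have h2 : dr.any (fun k => dr.count k == v) = false := by
            rw [List.any_eq_false]
            intro k hk
            have hkne := hdr_ne k hk
            have hkrest : k ∈ rest := (List.dropWhile_sublist _).subset (hdr ▸ hk)
            have := hdec k (List.mem_cons_of_mem _ hkrest)
            simp only [beq_iff_eq] at this ⊢
            rw [← hcount_ne k hkne]; exact this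
          simp [h1, h2]
        · rw [List.any_eq_true] at hdec
          rcases hdec with ⟨k, hkmem, hkv⟩
          simp only [beq_iff_eq] at hkv
          by_cases hkc : k = c
          · subst hkc
            rw [hcount_c] at hkv
            simp [hkv]
          · have hkrest : k ∈ rest := by
              rcases List.mem_cons.mp hkmem with h | h
              · exact absurd h hkc
              · exact h
            have hkdr : k ∈ dr := by
              by_contra hkdr
              exact hkc (hmemdr k hkrest hkdr).2
            have : dr.any (fun kk => dr.count kk == v) = true := by
              rw [List.any_eq_true]
              exact ⟨k, hkdr, by simp [← hcount_ne k hkc, hkv]⟩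
            simp [this]
      have hdrlen : dr.length ≤ n := by
        have h1 : dr.length ≤ rest.length := List.length_dropWhile_le _ _
        simp only [List.length_cons] at hlen
        omega
      rw [runScanB]
      simp only [← htk, ← hdr]
      rw [ihn dr hdrlen hdrs, hany 2, hany 3, hrun]
      simp [Bool.or_assoc]

theorem runScanB_eq (cs : List Char) (hs : cs.Pairwise (· ≤ ·)) (h2 h3 : Bool) :
      runScanB cs h2 h3 =
        (h2 || cs.any (fun k => cs.count k == 2),
         h3 || cs.any (fun k => cs.count k == 3)) :=
  runScanB_eq_aux cs.length cs le_rfl hs h2 h3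

-- A's any-over-distinct-letters equals B's any-over-the-sorted-string
theorem any_set_eq_any_sorted (l : List Char) (v : Nat) :
    (PySem.Set.ofList l).any (fun k => l.count k == v)
      = (PySem.List.sorted l (fun x => x) false).any
          (fun k => (PySem.List.sorted l (fun x => x) false).count k == v) := by
  have hperm : (PySem.List.sorted l (fun x => x) false).Perm l := PySem.List.sorted_perm l _ _
  have hcount : ∀ k, (PySem.List.sorted l (fun x => x) false).count k = l.count k := by
    intro k; exact hperm.count_eq k
  cases hdec : (PySem.Set.ofList l).any (fun k => l.count k == v)
  · rw [List.any_eq_false] at hdec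
    symm; rw [List.any_eq_false]
    intro k hk
    have : k ∈ l := hperm.mem_iff.mp hk
    have := hdec k ((PySem.Set.mem_ofList l k).mpr this)
    simpa [hcount k] using this
  · rw [List.any_eq_true] at hdec
    rcases hdec with ⟨k, hk, hkv⟩
    have hkl : k ∈ l := (PySem.Set.mem_ofList l k).mp hk
    symm; rw [List.any_eq_true]
    exact ⟨k, hperm.mem_iff.mpr hkl, by simpa [hcount k] using hkv⟩

theorem count_aux (data : List String) :
    ∀ (c2 c3 : Int),
      data.foldl (fun (acc : Int × Int) i =>
          let l := i.toList
          let st := (PySem.Set.ofList l).foldl (countStepA l) (acc.1, acc.2, false, false)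
          (st.1, st.2.1)) (c2, c3) =
      data.foldl (fun (acc : Int × Int) s =>
          let cs := PySem.List.sorted s.toList (fun x => x) false
          let hs := runScanB cs false false
          (acc.1 + (if hs.1 then 1 else 0), acc.2 + (if hs.2 then 1 else 0))) (c2, c3) := by
  induction data with
  | nil => intro c2 c3; rfl
  | cons s rest ih =>
      intro c2 c3
      simp only [List.foldl_cons]
      rw [foldl_countStepA]
      rw [runScanB_eq _ (PySem.List.sorted_pairwise s.toList (fun x => x))]
      rw [← any_set_eq_any_sorted s.toList 2, ← any_set_eq_any_sorted s.toList 3]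
      simp only [Bool.not_false, Bool.true_and, Bool.false_or]
      exact ih _ _

-- ===== VERDICT (by name: the statement is the Claim_ definition above) =====
theorem count_spec : Claim_equal_count := by
  intro data _
  show count data = count_alt data
  unfold count count_alt
  exact count_aux data 0 0
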